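-- pv_equiv track=rewrite | github.com/sharmakrishna276/Agglomerative_Clustering | agglomerative_clustering.py | hierarchical_distance
-- ===== SOURCE A (Python) =====
-- def hierarchical_distance(label, matrix, num):
--     p = len(label)
--     ans = [[0 for j in range(p)] for i in range(p)]
--     for i in range(p):
--         for j in range(p):
--             l1 = len(label[i])
--             l2 = len(label[j])
--             temp = num
--             for a in range(l1):
--                 for b in range(l2):
--                     temp = min(temp, matrix[label[i][a]][label[j][b]])
--             ans[i][j] = temp
--     return ans
-- ===== SOURCE B (Python) =====
-- def hierarchical_distance(label, matrix, num):
--     p = len(label)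
--     # stage 1: for each DISTINCT point x, memoize its min-distance to every cluster
--     rowmin = {}
--     for cl in label:
--         for x in cl:
--             if x not in rowmin:
--                 rowmin[x] = [min([matrix[x][y] for y in cl2] + [num]) for cl2 in label]
--     # stage 2: reduce each cluster's points over the memo table
--     return [[min([rowmin[x][j] for x in label[i]] + [num]) for j in range(p)]
--             for i in range(p)]
-- ===== Notes on version B (the rewrite author's own statement) =====
-- stated objective: alternative
-- what changed: B replaces A's quadruple nested loop with a two-stage reduction: it first memoizes, in a dict keyed by distinct point, that point's min distance to every cluster, then computes each cell by reducing the cluster's points over the memo table, so per-point work is never repeated across cluster pairs or duplicate points.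
import Mathlib
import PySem

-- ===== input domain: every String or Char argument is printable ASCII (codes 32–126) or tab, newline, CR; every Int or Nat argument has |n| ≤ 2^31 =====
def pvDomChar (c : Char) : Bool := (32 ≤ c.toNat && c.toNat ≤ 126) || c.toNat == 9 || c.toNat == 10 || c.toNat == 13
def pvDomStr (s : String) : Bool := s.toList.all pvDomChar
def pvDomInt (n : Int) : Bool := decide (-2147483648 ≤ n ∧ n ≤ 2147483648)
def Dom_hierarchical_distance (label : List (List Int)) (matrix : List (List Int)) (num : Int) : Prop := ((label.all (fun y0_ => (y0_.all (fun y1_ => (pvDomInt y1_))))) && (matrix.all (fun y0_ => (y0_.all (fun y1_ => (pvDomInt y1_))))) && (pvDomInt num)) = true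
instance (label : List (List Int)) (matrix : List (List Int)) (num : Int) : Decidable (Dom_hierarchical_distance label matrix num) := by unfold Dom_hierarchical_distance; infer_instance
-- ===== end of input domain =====

-- B replaces A's quadruple nested loop with a two-stage reduction: a dict memoizes,
-- per DISTINCT point, that point's min distance to every cluster; each cell is then
-- a reduction of the cluster's points over the memo table (alternative decomposition).

-- matrix[x][y] as both Pythons index it (Python negative-index rule; outside
-- Pre_ the Python raises and this helper's default is never relied upon)
def pvMval (matrix : List (List Int)) (x y : Int) : Int :=
  (PySem.List.pyGet? ((PySem.List.pyGet? matrix x).getD []) y).getD 0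

-- ===== PORT A =====
def hierarchical_distance (label : List (List Int)) (matrix : List (List Int)) (num : Int) : List (List Int) :=
  let p := label.length
  let ans := (List.range p).map (fun _ => (List.range p).map (fun _ => (0 : Int)))
  (List.range p).foldl (fun ans i =>
    (List.range p).foldl (fun ans j =>
      let temp := (label.getD i []).foldl (fun t x =>
        (label.getD j []).foldl (fun t y => min t (pvMval matrix x y)) t) num
      ans.modify i (fun row => row.set j temp)) ans) ans

-- ===== PORT B =====
-- min([matrix[x][y] for y in cl2] + [num]) of Source B
def pvClMin (matrix : List (List Int)) (num : Int) (x : Int) (cl2 : List Int) : Int :=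
  (PySem.List.min? (cl2.map (fun y => pvMval matrix x y) ++ [num]) (fun v => v)).getD 0

def hierarchical_distance_alt (label : List (List Int)) (matrix : List (List Int)) (num : Int) : List (List Int) :=
  let p := label.length
  let rowmin := label.foldl (fun d cl =>
    cl.foldl (fun d x =>
      if d.contains x then d
      else d.insert x (label.map (fun cl2 => pvClMin matrix num x cl2))) d)
    PySem.Dict.empty
  (List.range p).map (fun i =>
    (List.range p).map (fun j =>
      (PySem.List.min? ((label.getD i []).map (fun x => (rowmin.getD x []).getD j 0) ++ [num]) (fun v => v)).getD 0))

-- ===== PRECONDITION & SPEC =====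
-- Pre_ excludes exactly the inputs on which Python A raises an IndexError:
-- some point x of a cluster is out of range for matrix, or some matrix[x] row
-- is too short for a point y of a cluster (every (x, y) pair is
-- evaluated by A's loops).
def Pre_hierarchical_distance (label : List (List Int)) (matrix : List (List Int)) (num : Int) : Prop :=
  ∀ x ∈ label.flatten, PySem.Raise.InRange matrix.length x ∧
    ∀ y ∈ label.flatten, PySem.Raise.InRange ((PySem.List.pyGet? matrix x).getD []).length y
instance (label : List (List Int)) (matrix : List (List Int)) (num : Int) : Decidable (Pre_hierarchical_distance label matrix num) := by unfold Pre_hierarchical_distance; infer_instance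

def pvWitness_hierarchical_distance : List (List Int) × List (List Int) × Int :=
  ([[0], [1], []], [[5, 2], [7, 1]], 99)

def Spec_hierarchical_distance (label : List (List Int)) (matrix : List (List Int)) (num : Int) (out : List (List Int)) : Prop := out = hierarchical_distance_alt label matrix num
instance (label : List (List Int)) (matrix : List (List Int)) (num : Int) (out : List (List Int)) : Decidable (Spec_hierarchical_distance label matrix num out) := by unfold Spec_hierarchical_distance; infer_instance

-- ===== CLAIM (what is proved, stated in full; the proofs are below) =====
def Claim_equal_hierarchical_distance : Prop := ∀ (label : List (List Int)) (matrix : List (List Int)) (num : Int), Dom_hierarchical_distance label matrix num → Pre_hierarchical_distance label matrix num → Spec_hierarchical_distance label matrix num (hierarchical_distance label matrix num)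

-- ===== LEMMAS AND PROOFS =====

-- the (i, j) cell of a matrix, as an Option
def pvCell (m : List (List Int)) (i j : Nat) : Option Int := m[i]?.bind (fun r => r[j]?)

-- the per-cell value A computes
def pvT (label matrix : List (List Int)) (num : Int) (i j : Nat) : Int :=
  (label.getD i []).foldl (fun t x =>
    (label.getD j []).foldl (fun t y => min t (pvMval matrix x y)) t) num

-- the memo row Source B stores for point x
def pvR (label matrix : List (List Int)) (num : Int) (x : Int) : List Int :=
  label.map (fun cl2 => pvClMin matrix num x cl2)

theorem pv_cell_set (m : List (List Int)) (k l : Nat) (v : Int) (i j : Nat) :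
    pvCell (m.modify k (fun row => row.set l v)) i j
      = if k = i ∧ l = j then (pvCell m i j).map (fun _ => v) else pvCell m i j := by
  simp only [pvCell, List.getElem?_modify]
  cases hm : m[i]? with
  | none => split_ifs <;> simp
  | some r =>
      by_cases hk : k = i
      · simp only [hk, if_pos, Option.map_eq_map, Option.map_some, Option.bind_some, true_and]
        rw [List.getElem?_set]
        by_cases hl : l = j
        · subst hl
          simp only [if_pos]
          by_cases hlen : l < r.length
          · simp [hlen]
          · simp [hlen]
        · simp [hl]
      · simp [hk]

theorem pv_cell_foldl {α : Type} (i j : Nat) (φ : α → Option Int → Option Int)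
    (step : List (List Int) → α → List (List Int))
    (h : ∀ m a, pvCell (step m a) i j = φ a (pvCell m i j)) :
    ∀ (l : List α) (m : List (List Int)),
      pvCell (l.foldl step m) i j = l.foldl (fun c a => φ a c) (pvCell m i j) := by
  intro l
  induction l with
  | nil => intro m; rfl
  | cons a l ih => intro m; simp only [List.foldl_cons, ih, h]

theorem pv_foldl_id {β α : Type} (l : List α) (f : β → α → β) (c : β)
    (h : ∀ c a, a ∈ l → f c a = c) : l.foldl f c = c := by
  induction l generalizing c with
  | nil => rfl
  | cons a l ih =>
      simp only [List.foldl_cons]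
      rw [h c a (by simp)]
      exact ih c (fun c a ha => h c a (by simp [ha]))

theorem pv_foldl_congr {β α : Type} (l : List α) (f g : β → α → β)
    (h : ∀ c a, a ∈ l → f c a = g c a) : ∀ c, l.foldl f c = l.foldl g c := by
  induction l with
  | nil => intro c; rfl
  | cons a l ih =>
      intro c
      simp only [List.foldl_cons]
      rw [h c a (by simp)]
      exact ih (fun c a ha => h c a (by simp [ha])) _

theorem pv_fire_once {β : Type} (g : β → β) :
    ∀ (n i : Nat), i < n → ∀ c,
      (List.range n).foldl (fun c a => if a = i then g c else c) c = g c := by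
  intro n
  induction n with
  | zero => intro i h; omega
  | succ n ih =>
      intro i hi c
      rw [List.range_succ, List.foldl_append]
      by_cases h : i < n
      · rw [ih i h c]
        simp only [List.foldl_cons, List.foldl_nil]
        have : ¬ (n = i) := by omega
        simp [this]
      · have hni : i = n := by omega
        subst hni
        rw [pv_foldl_id _ _ c (fun c a ha => by
          have : a < i := List.mem_range.mp ha
          have : ¬ (a = i) := by omega
          simp [this])]
        simp

theorem pv_foldl_none {α : Type} (l : List α) (f : Option Int → α → Option Int)
    (h : ∀ a, f none a = none) : l.foldl f none = none := by
  induction l with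
  | nil => rfl
  | cons a l ih =>
      simp only [List.foldl_cons, h a]
      exact ih

theorem pv_foldl_len {α : Type} (l : List α) (f : List (List Int) → α → List (List Int))
    (h : ∀ m a, (f m a).length = m.length) :
    ∀ m, (l.foldl f m).length = m.length := by
  induction l with
  | nil => intro m; rfl
  | cons a l ih =>
      intro m
      simp only [List.foldl_cons]
      rw [ih, h]

theorem pv_lenA (label matrix : List (List Int)) (num : Int) :
    (hierarchical_distance label matrix num).length = label.length := by
  simp only [hierarchical_distance]
  rw [pv_foldl_len _ _ (fun m i => pv_foldl_len _ _ (fun m j => by simp) m)]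
  simp

theorem pv_cellA (label matrix : List (List Int)) (num : Int) (i j : Nat) :
    pvCell (hierarchical_distance label matrix num) i j
      = if i < label.length ∧ j < label.length then some (pvT label matrix num i j) else none := by
  have hstep : ∀ (m : List (List Int)) (i' : Nat),
      pvCell ((List.range label.length).foldl (fun ans j' =>
        ans.modify i' (fun row => row.set j' (pvT label matrix num i' j'))) m) i j
      = (List.range label.length).foldl (fun c j' => if i' = i ∧ j' = j
          then Option.map (fun _ => pvT label matrix num i' j') c else c) (pvCell m i j) := by
    intro m i'
    exact pv_cell_foldl i j _ _ (fun m j' => pv_cell_set m i' j' _ i j) _ m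
  have hmain : pvCell (hierarchical_distance label matrix num) i j
      = (List.range label.length).foldl (fun c i' => (List.range label.length).foldl
          (fun c j' => if i' = i ∧ j' = j then Option.map (fun _ => pvT label matrix num i' j') c else c) c)
        (pvCell ((List.range label.length).map (fun _ => (List.range label.length).map (fun _ => (0:Int)))) i j) := by
    simp only [hierarchical_distance]
    exact pv_cell_foldl i j _ _ (fun m i' => hstep m i') _ _
  have hc0 : pvCell ((List.range label.length).map (fun _ => (List.range label.length).map (fun _ => (0:Int)))) i j
      = if i < label.length ∧ j < label.length then some 0 else none := by
    by_cases hi : i < label.length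
    · by_cases hj : j < label.length
      · simp [pvCell, hi, hj]
      · simp [pvCell, hi, hj]
    · simp [pvCell, hi]
  rw [hmain, hc0]
  by_cases hij : i < label.length ∧ j < label.length
  · obtain ⟨hi, hj⟩ := hij
    simp only [hi, hj, and_self, if_true]
    have hinner : ∀ c, (List.range label.length).foldl
        (fun c i' => (List.range label.length).foldl
          (fun c j' => if i' = i ∧ j' = j then Option.map (fun _ => pvT label matrix num i' j') c else c) c) c
      = (List.range label.length).foldl
        (fun c i' => if i' = i then Option.map (fun _ => pvT label matrix num i j) c else c) c := by
      intro c
      apply pv_foldl_congr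
      intro c i' _
      by_cases hi' : i' = i
      · subst hi'
        rw [if_pos rfl]
        have h1 : ∀ c, (List.range label.length).foldl
            (fun c j' => if i' = i' ∧ j' = j then Option.map (fun _ => pvT label matrix num i' j') c else c) c
          = (List.range label.length).foldl
            (fun c j' => if j' = j then Option.map (fun _ => pvT label matrix num i' j) c else c) c := by
          intro c
          apply pv_foldl_congr
          intro c j' _
          by_cases hj' : j' = j
          · subst hj'; simp
          · simp [hj']
        rw [h1]
        exact pv_fire_once _ _ j hj c
      · rw [if_neg hi']
        exact pv_foldl_id _ _ _ (fun c j' _ => by simp [hi'])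
    rw [hinner, pv_fire_once _ _ i hi]
    simp
  · simp only [hij, if_false]
    exact pv_foldl_none _ _ (fun i' => pv_foldl_none _ _ (fun j' => by simp))

-- ---- B-side lemmas ----

-- seed commutation for running minima
theorem pv_foldl_min_seed (g : Int → Int) :
    ∀ (l : List Int) (a b : Int),
      l.foldl (fun c y => min c (g y)) (min a b) = min a (l.foldl (fun c y => min c (g y)) b) := by
  intro l
  induction l with
  | nil => intro a b; rfl
  | cons y l ih =>
      intro a b
      simp only [List.foldl_cons, min_assoc]
      exact ih a (min b (g y))

-- min(list + [num]) is the running-min loop seeded with num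
theorem pv_min_append (l : List Int) (num : Int) :
    (PySem.List.min? (l ++ [num]) (fun v => v)).getD 0
      = l.foldl (fun a v => min a v) num := by
  cases l with
  | nil => simp [PySem.List.min?]
  | cons x t =>
      rw [List.cons_append, PySem.List.min?_id_cons, Option.getD_some, List.foldl_append]
      simp only [List.foldl_cons, List.foldl_nil]
      have h1 : t.foldl (fun a v => min a v) (min num x)
          = min num (t.foldl (fun a v => min a v) x) := pv_foldl_min_seed (fun v => v) t num x
      have h2 : t.foldl (fun c y => min c y) x = t.foldl min x := by
        apply pv_foldl_congr; intro c a _; rfl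
      rw [h1, h2, min_comm]

-- factoring the inner running min out of A's nested fold
theorem pv_T_factor (Lj : List Int) (v : Int → Int → Int) :
    ∀ (Li : List Int) (t num : Int), t ≤ num →
      Li.foldl (fun t x => Lj.foldl (fun a y => min a (v x y)) t) t
        = Li.foldl (fun t x => min t (Lj.foldl (fun a y => min a (v x y)) num)) t := by
  intro Li
  induction Li with
  | nil => intro t num _; rfl
  | cons x L ih =>
      intro t num ht
      simp only [List.foldl_cons]
      have hseed : Lj.foldl (fun a y => min a (v x y)) t
          = min t (Lj.foldl (fun a y => min a (v x y)) num) := by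
        have h := pv_foldl_min_seed (v x) Lj t num
        rw [min_eq_left ht] at h
        exact h
      rw [hseed]
      exact ih _ num (le_trans (min_le_left _ _) ht)

-- dict-build invariant: every stored value is pvR of its key, and every
-- processed point is stored
theorem pv_build_cl (label matrix : List (List Int)) (num : Int) :
    ∀ (cl : List Int) (d : PySem.Dict Int (List Int)),
      (∀ z, d.get? z = none ∨ d.get? z = some (pvR label matrix num z)) →
      (∀ z, (cl.foldl (fun d x => if d.contains x then d
                else d.insert x (pvR label matrix num x)) d).get? z = none ∨
            (cl.foldl (fun d x => if d.contains x then d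
                else d.insert x (pvR label matrix num x)) d).get? z = some (pvR label matrix num z)) ∧
      (∀ z, z ∈ cl ∨ d.get? z ≠ none →
            (cl.foldl (fun d x => if d.contains x then d
                else d.insert x (pvR label matrix num x)) d).get? z = some (pvR label matrix num z)) := by
  intro cl
  induction cl with
  | nil =>
      intro d hd
      refine ⟨hd, fun z hz => ?_⟩
      rcases hz with h | h
      · simp at h
      · rcases hd z with h' | h'
        · exact absurd h' h
        · exact h'
  | cons x t ih =>
      intro d hd
      simp only [List.foldl_cons]
      by_cases hc : d.contains x
      · rw [if_pos hc]
        obtain ⟨h1, h2⟩ := ih d hd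
        refine ⟨h1, fun z hz => ?_⟩
        apply h2
        rcases hz with hz | hz
        · rcases List.mem_cons.mp hz with hz | hz
          · right
            subst hz
            intro hn
            rw [PySem.Dict.contains_eq_isSome_get?, hn] at hc
            simp at hc
          · left; exact hz
        · right; exact hz
      · rw [if_neg hc]
        have hd' : ∀ z, (d.insert x (pvR label matrix num x)).get? z = none ∨
            (d.insert x (pvR label matrix num x)).get? z = some (pvR label matrix num z) := by
          intro z
          rw [PySem.Dict.get?_insert]
          by_cases hzx : z = x
          · subst hzx; right; simp
          · rw [if_neg hzx]; exact hd z
        obtain ⟨h1, h2⟩ := ih _ hd'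
        refine ⟨h1, fun z hz => ?_⟩
        apply h2
        rcases hz with hz | hz
        · rcases List.mem_cons.mp hz with hz | hz
          · right
            subst hz
            rw [PySem.Dict.get?_insert_self]
            simp
          · left; exact hz
        · right
          rw [PySem.Dict.get?_insert]
          by_cases hzx : z = x
          · subst hzx; simp
          · rw [if_neg hzx]; exact hz

theorem pv_build_get (label matrix : List (List Int)) (num : Int) :
    ∀ x ∈ label.flatten,
      (label.foldl (fun d cl => cl.foldl (fun d x => if d.contains x then d
          else d.insert x (pvR label matrix num x)) d) PySem.Dict.empty).get? x
        = some (pvR label matrix num x) := by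
  suffices h : ∀ (cls : List (List Int)) (d : PySem.Dict Int (List Int)),
      (∀ z, d.get? z = none ∨ d.get? z = some (pvR label matrix num z)) →
      ∀ z, z ∈ cls.flatten ∨ d.get? z ≠ none →
        (cls.foldl (fun d cl => cl.foldl (fun d x => if d.contains x then d
            else d.insert x (pvR label matrix num x)) d) d).get? z = some (pvR label matrix num z) by
    intro x hx
    exact h label PySem.Dict.empty (fun z => Or.inl (PySem.Dict.get?_empty z)) x (Or.inl hx)
  intro cls
  induction cls with
  | nil =>
      intro d hd z hz
      rcases hz with h | h
      · simp at h
      · rcases hd z with h' | h'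
        · exact absurd h' h
        · exact h'
  | cons cl cls ih =>
      intro d hd z hz
      simp only [List.foldl_cons]
      obtain ⟨h1, h2⟩ := pv_build_cl label matrix num cl d hd
      apply ih _ h1
      rcases hz with hz | hz
      · rw [List.flatten_cons, List.mem_append] at hz
        rcases hz with hz | hz
        · right
          rw [h2 z (Or.inl hz)]
          simp
        · left; exact hz
      · right
        rw [h2 z (Or.inr hz)]
        simp

theorem pv_R_getD (label matrix : List (List Int)) (num : Int) (x : Int) (j : Nat)
    (hj : j < label.length) :
    (pvR label matrix num x).getD j 0
      = (label.getD j []).foldl (fun a y => min a (pvMval matrix x y)) num := by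
  unfold pvR pvClMin
  rw [List.getD_eq_getElem?_getD, List.getElem?_map, List.getElem?_eq_getElem hj]
  simp only [Option.map_some, Option.getD_some]
  rw [pv_min_append]
  rw [List.foldl_map]
  rw [List.getD_eq_getElem?_getD, List.getElem?_eq_getElem hj]
  simp

theorem pv_cellB (label matrix : List (List Int)) (num : Int) (i j : Nat)
    (hi : i < label.length) (hj : j < label.length) :
    pvCell (hierarchical_distance_alt label matrix num) i j
      = some (pvT label matrix num i j) := by
  unfold hierarchical_distance_alt pvCell
  simp only [List.getElem?_map, List.getElem?_range hi, List.getElem?_range hj,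
    Option.map_some, Option.bind_some]
  congr 1
  rw [pv_min_append, List.foldl_map]
  have hrm : ∀ x ∈ label.getD i [], (((label.foldl (fun d cl => cl.foldl (fun d x =>
      if d.contains x then d
      else d.insert x (label.map (fun cl2 => pvClMin matrix num x cl2))) d)
      PySem.Dict.empty).getD x []).getD j 0)
      = (label.getD j []).foldl (fun a y => min a (pvMval matrix x y)) num := by
    intro x hx
    have hxf : x ∈ label.flatten := by
      rw [List.mem_flatten]
      refine ⟨label.getD i [], ?_, hx⟩
      rw [List.getD_eq_getElem?_getD, List.getElem?_eq_getElem hi]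
      exact List.getElem_mem hi
    have := pv_build_get label matrix num x hxf
    rw [PySem.Dict.getD_eq_get?_getD]
    unfold pvR at this
    rw [this, Option.getD_some]
    exact pv_R_getD label matrix num x j hj
  rw [pv_foldl_congr (label.getD i [])
    (fun (a : Int) (x : Int) => min a (((label.foldl (fun d cl => cl.foldl (fun d x =>
      if d.contains x then d
      else d.insert x (label.map (fun cl2 => pvClMin matrix num x cl2))) d)
      PySem.Dict.empty).getD x []).getD j 0))
    (fun a x => min a ((label.getD j []).foldl (fun a y => min a (pvMval matrix x y)) num))
    (fun a x hx => by dsimp only; rw [hrm x hx]) num]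
  unfold pvT
  rw [pv_T_factor (label.getD j []) (fun x y => pvMval matrix x y) (label.getD i []) num num le_rfl]

theorem pv_lenB (label matrix : List (List Int)) (num : Int) :
    (hierarchical_distance_alt label matrix num).length = label.length := by
  simp [hierarchical_distance_alt]

theorem pv_AB_eq (label matrix : List (List Int)) (num : Int) :
    hierarchical_distance label matrix num = hierarchical_distance_alt label matrix num := by
  apply List.ext_getElem?
  intro i
  by_cases hi : i < label.length
  · have hA : i < (hierarchical_distance label matrix num).length := by rw [pv_lenA]; exact hi
    have hB : i < (hierarchical_distance_alt label matrix num).length := by rw [pv_lenB]; exact hi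
    rw [List.getElem?_eq_getElem hA, List.getElem?_eq_getElem hB]
    have hrow : (hierarchical_distance label matrix num)[i] = (hierarchical_distance_alt label matrix num)[i] := by
      apply List.ext_getElem?
      intro j
      have h1 : pvCell (hierarchical_distance label matrix num) i j
          = (hierarchical_distance label matrix num)[i][j]? := by
        simp [pvCell, List.getElem?_eq_getElem hA]
      have h2 : pvCell (hierarchical_distance_alt label matrix num) i j
          = (hierarchical_distance_alt label matrix num)[i][j]? := by
        simp [pvCell, List.getElem?_eq_getElem hB]
      by_cases hj : j < label.length
      · rw [← h1, ← h2, pv_cellA, pv_cellB label matrix num i j hi hj]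
        simp [hi, hj]
      · have hAn : pvCell (hierarchical_distance label matrix num) i j = none := by
          rw [pv_cellA]; simp [hj]
        have hBn : pvCell (hierarchical_distance_alt label matrix num) i j = none := by
          unfold hierarchical_distance_alt pvCell
          simp only [List.getElem?_map, List.getElem?_range hi, Option.map_some, Option.bind_some]
          have hr : (List.range label.length)[j]? = none :=
            List.getElem?_eq_none (by simpa using hj)
          rw [hr]
          rfl
        rw [← h1, ← h2, hAn, hBn]
    rw [hrow]
  · rw [List.getElem?_eq_none (by rw [pv_lenA]; omega), List.getElem?_eq_none (by rw [pv_lenB]; omega)]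

-- ===== VERDICT (by name: the statement is the Claim_ definition above) =====
theorem hierarchical_distance_spec : Claim_equal_hierarchical_distance := by
  intro label matrix num _ _
  unfold Spec_hierarchical_distance
  exact pv_AB_eq label matrix num
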